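-- pv_equiv track=rewrite | github.com/kartikeychoudhary/competitive_programming | hackerrank/problem_solving/implementation/picking_numbers.py | pickingNumbers
-- ===== SOURCE A (Python) =====
-- def pickingNumbers(a):
--     length = []
--     temp = []
--     for i in a:
--         m = a.count(i)
--         u = a.count(i+1)
--         l = a.count(i-1)
--         total1 = m + u
--         total2 = m + l
--         length.append(max(total1, total2))
--
--     return max(length)
-- ===== SOURCE B (Python) =====
-- def pickingNumbers(a):
--     best = 0
--     prev = None      # previous distinct value in sorted order
--     prev_run = 0     # its run length
--     cur = None       # current value
--     cur_run = 0      # its run length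
--     for x in sorted(a):
--         if x == cur:
--             cur_run += 1
--         else:
--             prev, prev_run = cur, cur_run
--             cur, cur_run = x, 1
--         if prev is not None and x == prev + 1:
--             best = max(best, prev_run + cur_run)
--         else:
--             best = max(best, cur_run)
--     return best
-- ===== Notes on version B (the rewrite author's own statement) =====
-- stated objective: faster
-- what changed: B sorts the list once and makes a single linear pass tracking the run lengths of the current and previous distinct values (merging adjacent runs), instead of A's three full .count() scans per element.
import Mathlib
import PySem

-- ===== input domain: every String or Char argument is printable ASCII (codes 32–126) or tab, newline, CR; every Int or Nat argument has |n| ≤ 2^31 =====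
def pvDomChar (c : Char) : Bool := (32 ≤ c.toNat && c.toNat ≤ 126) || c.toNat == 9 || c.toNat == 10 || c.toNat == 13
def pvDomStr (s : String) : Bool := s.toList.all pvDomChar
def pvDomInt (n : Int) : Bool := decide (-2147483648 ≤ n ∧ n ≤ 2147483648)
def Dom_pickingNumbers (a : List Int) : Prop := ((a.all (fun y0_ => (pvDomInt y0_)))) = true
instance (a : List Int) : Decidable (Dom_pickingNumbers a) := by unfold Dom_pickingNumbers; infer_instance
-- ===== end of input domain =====

-- B sorts once and does a single linear pass merging adjacent runs, replacing A's
-- per-element full-list .count() scans (objective: faster).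

-- ===== PORT A =====
def pickingNumbers (a : List Int) : Int :=
  let length := a.foldl (fun acc i =>
    let m : Int := PySem.List.count a i
    let u : Int := PySem.List.count a (i + 1)
    let l : Int := PySem.List.count a (i - 1)
    let total1 := m + u
    let total2 := m + l
    acc ++ [max total1 total2]) []
  (PySem.List.max? length (fun x => x)).getD 0   -- max([]) raises ValueError: excluded by Pre_

-- ===== PORT B =====
-- one loop iteration of Source B's pass: state = (best, prev, prev_run, cur, cur_run)
def pvStepB (st : Int × Option Int × Int × Option Int × Int) (x : Int) :
    Int × Option Int × Int × Option Int × Int :=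
  let (best, prev, prevRun, cur, curRun) := st
  let (prev, prevRun, cur, curRun) :=
    if cur = some x then (prev, prevRun, cur, curRun + 1)
    else (cur, curRun, some x, 1)
  let best :=
    match prev with
    | some p => if x = p + 1 then max best (prevRun + curRun) else max best curRun
    | none => max best curRun
  (best, prev, prevRun, cur, curRun)

def pickingNumbers_alt (a : List Int) : Int :=
  ((PySem.List.sorted a (fun x => x) false).foldl pvStepB
    (0, none, 0, none, 0)).1

-- ===== PRECONDITION & SPEC =====
-- Pre_ excludes only the empty list, where A raises ValueError (max of an empty sequence).
def Pre_pickingNumbers (a : List Int) : Prop := a ≠ []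
instance (a : List Int) : Decidable (Pre_pickingNumbers a) := by unfold Pre_pickingNumbers; infer_instance
def pvWitness_pickingNumbers : List Int := ([4, 6, 5, 3, 3, 1])

def Spec_pickingNumbers (a : List Int) (out : Int) : Prop := out = pickingNumbers_alt a
instance (a : List Int) (out : Int) : Decidable (Spec_pickingNumbers a out) := by unfold Spec_pickingNumbers; infer_instance

-- ===== CLAIM (what is proved, stated in full; the proofs are below) =====
def Claim_equal_pickingNumbers : Prop := ∀ (a : List Int), Dom_pickingNumbers a → Pre_pickingNumbers a → Spec_pickingNumbers a (pickingNumbers a)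

-- ===== LEMMAS AND PROOFS =====

-- integer-valued count
def pvCnt (p : List Int) (v : Int) : Int := (p.count v : Int)

theorem pvCnt_append (p : List Int) (x v : Int) :
    pvCnt (p ++ [x]) v = pvCnt p v + (if x = v then 1 else 0) := by
  simp [pvCnt, List.count_append]; split_ifs with h <;> simp [h]

theorem pvCnt_nonneg (p : List Int) (v : Int) : 0 ≤ pvCnt p v := by
  simp [pvCnt]

theorem pvCnt_eq_zero {p : List Int} {v : Int} (h : v ∉ p) : pvCnt p v = 0 := by
  simp [pvCnt, List.count_eq_zero.mpr h]

-- A's candidate at element i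
def pvCandA (a : List Int) (i : Int) : Int :=
  max ((PySem.List.count a i : Int) + PySem.List.count a (i + 1))
      ((PySem.List.count a i : Int) + PySem.List.count a (i - 1))

theorem pvA_eq (a : List Int) :
    pickingNumbers a = (PySem.List.max? (a.map (pvCandA a)) (fun x => x)).getD 0 := by
  unfold pickingNumbers pvCandA
  dsimp only
  rw [PySem.List.foldl_append_singleton_eq_map]
  simp

-- loop invariant for B's pass over the processed (sorted) prefix p
def pvInv (p : List Int) (st : Int × Option Int × Int × Option Int × Int) : Prop :=
  (p = [] ∧ st = (0, none, 0, none, 0)) ∨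
  ∃ L, p ≠ [] ∧ L ∈ p ∧ (∀ w ∈ p, w ≤ L) ∧
    st.2.2.2.1 = some L ∧ st.2.2.2.2 = pvCnt p L ∧
    ((st.2.1 = none ∧ st.2.2.1 = 0 ∧ ∀ w ∈ p, w = L) ∨
     (∃ pv, st.2.1 = some pv ∧ pv ∈ p ∧ pv < L ∧ (∀ w ∈ p, w < L → w ≤ pv) ∧
        st.2.2.1 = pvCnt p pv)) ∧
    (∀ w ∈ p, pvCnt p w + pvCnt p (w - 1) ≤ st.1) ∧
    (∃ w, w ∈ p ∧ st.1 = pvCnt p w + pvCnt p (w - 1))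

theorem pvBest_ext (p : List Int) (x best w0 : Int)
    (hmax : ∀ w ∈ p, w ≤ x)
    (hbound : ∀ w ∈ p, pvCnt p w + pvCnt p (w - 1) ≤ best)
    (hw0 : w0 ∈ p) (hbest : best = pvCnt p w0 + pvCnt p (w0 - 1)) :
    (∀ w ∈ p ++ [x], pvCnt (p ++ [x]) w + pvCnt (p ++ [x]) (w - 1)
        ≤ max best (pvCnt (p ++ [x]) x + pvCnt (p ++ [x]) (x - 1))) ∧
    (∃ w, w ∈ p ++ [x] ∧ max best (pvCnt (p ++ [x]) x + pvCnt (p ++ [x]) (x - 1))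
        = pvCnt (p ++ [x]) w + pvCnt (p ++ [x]) (w - 1)) := by
  have hcx : pvCnt (p ++ [x]) x = pvCnt p x + 1 := by rw [pvCnt_append]; simp
  have hcne : ∀ y, y ≠ x → pvCnt (p ++ [x]) y = pvCnt p y := by
    intro y hy; rw [pvCnt_append]; simp [Ne.symm hy]
  constructor
  · intro w hw
    rcases List.mem_append.mp hw with hw | hw
    · by_cases hwx : w = x
      · subst hwx; exact le_max_right _ _
      · have hwlt : w < x := lt_of_le_of_ne (hmax _ hw) hwx
        rw [hcne _ hwx, hcne _ (by omega)]
        exact le_trans (hbound _ hw) (le_max_left _ _)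
    · simp at hw; subst hw; exact le_max_right _ _
  · by_cases hw0x : w0 = x
    · subst hw0x
      refine ⟨w0, by simp, ?_⟩
      rw [hcx, hcne _ (by omega)]
      rw [max_eq_right (by omega)]
    · have hwlt : w0 < x := lt_of_le_of_ne (hmax _ hw0) hw0x
      have h1 : pvCnt (p ++ [x]) w0 = pvCnt p w0 := hcne _ hw0x
      have h2 : pvCnt (p ++ [x]) (w0 - 1) = pvCnt p (w0 - 1) := hcne _ (by omega)
      rcases le_total (pvCnt (p ++ [x]) x + pvCnt (p ++ [x]) (x - 1)) best with hle | hle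
      · exact ⟨w0, by simp [hw0], by rw [max_eq_left hle, h1, h2, hbest]⟩
      · exact ⟨x, by simp, by rw [max_eq_right hle]⟩

theorem pvInv_step (p : List Int) (x : Int) (st : Int × Option Int × Int × Option Int × Int)
    (hx : ∀ w ∈ p, w ≤ x) (h : pvInv p st) : pvInv (p ++ [x]) (pvStepB st x) := by
  obtain ⟨best, prev, prevRun, cur, curRun⟩ := st
  rcases h with ⟨hp, hst⟩ | ⟨L, hne, hLmem, hLmax, hcur, hcurRun, hprev, hbound, w0, hw0, hbest⟩
  · -- p was empty: first element
    simp only [Prod.mk.injEq] at hst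
    obtain ⟨rfl, rfl, rfl, rfl, rfl⟩ := hst
    subst hp
    have hstep : pvStepB ((0 : Int), (none : Option Int), (0 : Int), (none : Option Int), (0 : Int)) x
        = (max 0 1, none, 0, some x, 1) := by
      simp [pvStepB]
    have hc1 : pvCnt [x] x = 1 := by simp [pvCnt]
    have hc0 : pvCnt [x] (x - 1) = 0 := pvCnt_eq_zero (by simp)
    rw [hstep]
    refine Or.inr ⟨x, by simp, by simp, by simp, by simp, by simpa using hc1.symm,
      Or.inl ⟨by simp, by simp, by simp⟩, ?_, ?_⟩
    · intro w hw
      simp only [List.nil_append, List.mem_singleton] at hw; subst hw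
      simp only [List.nil_append]; rw [hc1, hc0]; simp
    · exact ⟨x, by simp, by simp only [List.nil_append]; rw [hc1, hc0]; simp⟩
  · dsimp only at hcur hcurRun hprev hbest hbound
    subst hcur
    have hcxx : pvCnt (p ++ [x]) x = pvCnt p x + 1 := by rw [pvCnt_append]; simp
    have hcne : ∀ y, y ≠ x → pvCnt (p ++ [x]) y = pvCnt p y := by
      intro y hy; rw [pvCnt_append]; simp [Ne.symm hy]
    have hmemx : ∀ w ∈ p ++ [x], w ≤ x := by
      intro w hw; rcases List.mem_append.mp hw with hw | hw
      · exact hx _ hw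
      · simp at hw; omega
    rcases hprev with ⟨rfl, hpr0, hall⟩ | ⟨pv, rfl, hpvmem, hpvlt, hpvmax, hpvrun⟩
    · -- prev = none : all of p equals L
      by_cases hxL : x = L
      · subst hxL
        have hstep : pvStepB (best, none, prevRun, some x, curRun) x
            = (max best (curRun + 1), none, prevRun, some x, curRun + 1) := by
          simp [pvStepB]
        have hc0 : pvCnt (p ++ [x]) (x - 1) = 0 := by
          rw [hcne _ (by omega)]
          exact pvCnt_eq_zero (fun hm => by have := hall _ hm; omega)
        have hcand : max best (curRun + 1)
            = max best (pvCnt (p ++ [x]) x + pvCnt (p ++ [x]) (x - 1)) := by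
          rw [hc0, hcxx, hcurRun]; ring_nf
        rw [hstep]
        refine Or.inr ⟨x, by simp, by simp [hLmem], hmemx, by simp, by simp [hcxx, hcurRun],
          Or.inl ⟨by simp, hpr0, ?_⟩, ?_, ?_⟩
        · intro w hw; rcases List.mem_append.mp hw with hw | hw
          · exact hall _ hw
          · simpa using hw
        · simpa [hcand] using (pvBest_ext p x best w0 hx hbound hw0 hbest).1
        · simpa [hcand] using (pvBest_ext p x best w0 hx hbound hw0 hbest).2
      · -- new value strictly above the single run
        have hLx : L < x := lt_of_le_of_ne (hx _ hLmem) (fun hc => hxL hc.symm)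
        have hLn : ¬ ((some L : Option Int) = some x) := by simp; omega
        have hxnp : x ∉ p := fun hm => by have := hall _ hm; omega
        have hstep : pvStepB (best, none, prevRun, some L, curRun) x
            = (if x = L + 1 then max best (curRun + 1) else max best 1,
               some L, curRun, some x, 1) := by
          simp only [pvStepB, if_neg hLn]
        have hc1 : pvCnt (p ++ [x]) x = 1 := by rw [hcxx, pvCnt_eq_zero hxnp]; omega
        have hcand : (if x = L + 1 then max best (curRun + 1) else max best 1)
            = max best (pvCnt (p ++ [x]) x + pvCnt (p ++ [x]) (x - 1)) := by
          by_cases hadj : x = L + 1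
          · rw [if_pos hadj, hc1, hcne _ (by omega)]
            have hxm : x - 1 = L := by omega
            rw [hxm, hcurRun]; ring_nf
          · have hz : x - 1 ∉ p := fun hm => by have := hall _ hm; omega
            rw [if_neg hadj, hc1, hcne _ (by omega), pvCnt_eq_zero hz]
            norm_num
        rw [hstep]
        refine Or.inr ⟨x, by simp, by simp, hmemx, by simp, by simp [hc1],
          Or.inr ⟨L, by simp, by simp [hLmem], hLx, ?_, ?_⟩, ?_, ?_⟩
        · intro w hw hwlt; rcases List.mem_append.mp hw with hw | hw
          · exact le_of_eq (hall _ hw)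
          · simp at hw; omega
        · simp [hcurRun, hcne _ (by omega : L ≠ x)]
        · simpa [hcand] using (pvBest_ext p x best w0 hx hbound hw0 hbest).1
        · simpa [hcand] using (pvBest_ext p x best w0 hx hbound hw0 hbest).2
    · -- prev = some pv
      by_cases hxL : x = L
      · subst hxL
        have hstep : pvStepB (best, some pv, prevRun, some x, curRun) x
            = (if x = pv + 1 then max best (prevRun + (curRun + 1)) else max best (curRun + 1),
               some pv, prevRun, some x, curRun + 1) := by
          simp [pvStepB]
        have hcand : (if x = pv + 1 then max best (prevRun + (curRun + 1)) else max best (curRun + 1))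
            = max best (pvCnt (p ++ [x]) x + pvCnt (p ++ [x]) (x - 1)) := by
          by_cases hadj : x = pv + 1
          · have hpvx : pv = x - 1 := by omega
            rw [if_pos hadj, hcxx, hcne _ (by omega : x - 1 ≠ x), ← hpvx, hpvrun, hcurRun]
            ring_nf
          · have hz : x - 1 ∉ p := fun hm => by have := hpvmax _ hm (by omega); omega
            rw [if_neg hadj, hcxx, hcne _ (by omega : x - 1 ≠ x), pvCnt_eq_zero hz, hcurRun]
            ring_nf
        rw [hstep]
        refine Or.inr ⟨x, by simp, by simp [hLmem], hmemx, by simp, by simp [hcxx, hcurRun],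
          Or.inr ⟨pv, by simp, by simp [hpvmem], hpvlt, ?_, ?_⟩, ?_, ?_⟩
        · intro w hw hwlt; rcases List.mem_append.mp hw with hw | hw
          · exact hpvmax _ hw hwlt
          · simp at hw; omega
        · simp [hpvrun, hcne _ (by omega : pv ≠ x)]
        · simpa [hcand] using (pvBest_ext p x best w0 hx hbound hw0 hbest).1
        · simpa [hcand] using (pvBest_ext p x best w0 hx hbound hw0 hbest).2
      · -- new value strictly above both runs
        have hLx : L < x := lt_of_le_of_ne (hx _ hLmem) (fun hc => hxL hc.symm)
        have hLn : ¬ ((some L : Option Int) = some x) := by simp; omega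
        have hxnp : x ∉ p := fun hm => by have := hLmax _ hm; omega
        have hstep : pvStepB (best, some pv, prevRun, some L, curRun) x
            = (if x = L + 1 then max best (curRun + 1) else max best 1,
               some L, curRun, some x, 1) := by
          simp only [pvStepB, if_neg hLn]
        have hc1 : pvCnt (p ++ [x]) x = 1 := by rw [hcxx, pvCnt_eq_zero hxnp]; omega
        have hcand : (if x = L + 1 then max best (curRun + 1) else max best 1)
            = max best (pvCnt (p ++ [x]) x + pvCnt (p ++ [x]) (x - 1)) := by
          by_cases hadj : x = L + 1
          · rw [if_pos hadj, hc1, hcne _ (by omega)]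
            have hxm : x - 1 = L := by omega
            rw [hxm, hcurRun]; ring_nf
          · have hz : x - 1 ∉ p := fun hm => by have := hLmax _ hm; omega
            rw [if_neg hadj, hc1, hcne _ (by omega), pvCnt_eq_zero hz]
            norm_num
        rw [hstep]
        refine Or.inr ⟨x, by simp, by simp, hmemx, by simp, by simp [hc1],
          Or.inr ⟨L, by simp, by simp [hLmem], hLx, ?_, ?_⟩, ?_, ?_⟩
        · intro w hw hwlt; rcases List.mem_append.mp hw with hw | hw
          · exact hLmax _ hw
          · simp at hw; omega
        · simp [hcurRun, hcne _ (by omega : L ≠ x)]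
        · simpa [hcand] using (pvBest_ext p x best w0 hx hbound hw0 hbest).1
        · simpa [hcand] using (pvBest_ext p x best w0 hx hbound hw0 hbest).2

theorem pvInv_loop_aux (rest p : List Int) (st : Int × Option Int × Int × Option Int × Int)
    (hs : (p ++ rest).Pairwise (· ≤ ·)) (h : pvInv p st) :
    pvInv (p ++ rest) (rest.foldl pvStepB st) := by
  induction rest generalizing p st with
  | nil => simpa using h
  | cons x rest ih =>
    have hx : ∀ w ∈ p, w ≤ x := by
      rcases List.pairwise_append.mp hs with ⟨_, _, hcross⟩
      exact fun w hw => hcross _ hw _ (by simp)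
    have h' : pvInv (p ++ [x]) (pvStepB st x) := pvInv_step p x st hx h
    have hs' : ((p ++ [x]) ++ rest).Pairwise (· ≤ ·) := by
      simpa using hs
    simpa using ih (p ++ [x]) (pvStepB st x) hs' h'

theorem pvInv_loop (s : List Int) (hs : s.Pairwise (· ≤ ·)) :
    pvInv s (s.foldl pvStepB (0, none, 0, none, 0)) := by
  simpa using pvInv_loop_aux s [] (0, none, 0, none, 0) (by simpa using hs) (Or.inl ⟨rfl, rfl⟩)

-- ===== VERDICT (by name: the statement is the Claim_ definition above) =====
theorem pickingNumbers_spec : Claim_equal_pickingNumbers := by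
  intro a _ hne
  unfold Spec_pickingNumbers
  have hperm : (PySem.List.sorted a (fun x => x) false).Perm a := PySem.List.sorted_perm a _ _
  have hpair : (PySem.List.sorted a (fun x => x) false).Pairwise (· ≤ ·) := by
    simpa using PySem.List.sorted_pairwise (xs := a) (key := fun x => x)
  have hsne : PySem.List.sorted a (fun x => x) false ≠ [] := by
    rw [Ne, PySem.List.sorted_eq_nil_iff]; exact hne
  rcases pvInv_loop _ hpair with ⟨h0, _⟩ | ⟨L, _h1, _h2, _h3, _h4, _h5, _h6, hbound, w0, hw0, hbest⟩
  · exact absurd h0 hsne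
  have hcnt : ∀ v, pvCnt (PySem.List.sorted a (fun x => x) false) v = pvCnt a v :=
    fun v => by simp [pvCnt, hperm.count_eq]
  have hw0a : w0 ∈ a := hperm.mem_iff.mp hw0
  have hbound' : ∀ w ∈ a, pvCnt a w + pvCnt a (w - 1) ≤ pickingNumbers_alt a := by
    intro w hw
    have := hbound w (hperm.mem_iff.mpr hw)
    rw [hcnt, hcnt] at this
    exact this
  have hBval : pickingNumbers_alt a = pvCnt a w0 + pvCnt a (w0 - 1) := by
    show (_ : Int × Option Int × Int × Option Int × Int).1 = _
    rw [hbest, hcnt, hcnt]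
  have hCand : ∀ i, pvCandA a i
      = max (pvCnt a i + pvCnt a (i + 1)) (pvCnt a i + pvCnt a (i - 1)) := by
    intro i; simp [pvCandA, pvCnt, PySem.List.count]
  rw [pvA_eq]
  have hmapne : a.map (pvCandA a) ≠ [] := by simpa using hne
  rcases hM : PySem.List.max? (a.map (pvCandA a)) (fun x => x) with _ | mA
  · exact absurd ((PySem.List.max?_eq_none_iff _ _).mp hM) hmapne
  simp only [Option.getD_some]
  obtain ⟨i, hia, hAi⟩ := List.mem_map.mp (PySem.List.max?_mem hM)
  have hmax := PySem.List.max?_isMax hM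
  apply le_antisymm
  · -- mA ≤ B
    rw [← hAi, hCand]
    have h1 : pvCnt a i + pvCnt a (i - 1) ≤ pickingNumbers_alt a := hbound' i hia
    have h2 : pvCnt a i + pvCnt a (i + 1) ≤ pickingNumbers_alt a := by
      by_cases hnx : (i + 1) ∈ a
      · have := hbound' (i + 1) hnx
        have he : i + 1 - 1 = i := by omega
        rw [he] at this
        omega
      · rw [pvCnt_eq_zero hnx]
        have := pvCnt_nonneg a (i - 1)
        omega
    omega
  · -- B ≤ mA
    have hle : pvCandA a w0 ≤ mA := hmax _ (List.mem_map.mpr ⟨w0, hw0a, rfl⟩)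
    rw [hCand] at hle
    rw [hBval]
    omega
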